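-- pv_equiv track=rewrite | github.com/CodingThrust/problem-reductions | docs/paper/verify-reductions/verify_partition_into_cliques_minimum_covering_by_cliques.py | is_valid_edge_clique_cover
-- ===== SOURCE A (Python) =====
-- def is_valid_edge_clique_cover(n, edges, k, edge_config):
--     """Check if edge_config is a valid covering by <= k cliques.
--
--     edge_config: list of length |E|, edge_config[e] = clique group index.
--     For each group, the vertices touched by edges in that group must form a clique.
--     """
--     if len(edge_config) != len(edges):
--         return False
--     if len(edges) == 0:
--         return True
--     max_group = max(edge_config)
--     if max_group >= k:
--         return False
--     if any(g < 0 for g in edge_config):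
--         return False
--
--     edge_set = set()
--     for u, v in edges:
--         edge_set.add((min(u, v), max(u, v)))
--
--     # For each group, collect vertices and check clique
--     for group in range(max_group + 1):
--         vertices = set()
--         for idx, g in enumerate(edge_config):
--             if g == group:
--                 u, v = edges[idx]
--                 vertices.add(u)
--                 vertices.add(v)
--         verts = sorted(vertices)
--         for i in range(len(verts)):
--             for j in range(i + 1, len(verts)):
--                 a, b = min(verts[i], verts[j]), max(verts[i], verts[j])
--                 if (a, b) not in edge_set:
--                     return False
--     return True
-- ===== SOURCE B (Python) =====
-- def is_valid_edge_clique_cover(n, edges, k, edge_config):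
--     """Check if edge_config is a valid covering by <= k cliques.
--
--     Idiomatic one-pass rewrite: build per-vertex adjacency sets and per-group
--     vertex buckets in a single zip pass, then check each group's vertex set S
--     is a clique by testing S - {u} <= adj[u] for every u in S.
--     """
--     if len(edge_config) != len(edges):
--         return False
--     if len(edges) == 0:
--         return True
--     max_group = max(edge_config)
--     if max_group >= k:
--         return False
--     if any(g < 0 for g in edge_config):
--         return False
--
--     adj = {}
--     groups = {}
--     for g, (u, v) in zip(edge_config, edges):
--         adj.setdefault(u, set()).add(v)
--         adj.setdefault(v, set()).add(u)
--         groups.setdefault(g, set()).update((u, v))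
--     return all(
--         (S - {u}) <= adj.get(u, set())
--         for S in groups.values()
--         for u in S
--     )
-- ===== Notes on version B (the rewrite author's own statement) =====
-- stated objective: idiomatic
-- what changed: Replaces A's global unordered-pair edge set plus per-group sorted-vertex double index loop by a single zip pass that builds per-vertex adjacency sets and per-group vertex buckets, then checks each group S by the set-containment S - {u} <= adj[u] for every u in S.
import Mathlib
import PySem

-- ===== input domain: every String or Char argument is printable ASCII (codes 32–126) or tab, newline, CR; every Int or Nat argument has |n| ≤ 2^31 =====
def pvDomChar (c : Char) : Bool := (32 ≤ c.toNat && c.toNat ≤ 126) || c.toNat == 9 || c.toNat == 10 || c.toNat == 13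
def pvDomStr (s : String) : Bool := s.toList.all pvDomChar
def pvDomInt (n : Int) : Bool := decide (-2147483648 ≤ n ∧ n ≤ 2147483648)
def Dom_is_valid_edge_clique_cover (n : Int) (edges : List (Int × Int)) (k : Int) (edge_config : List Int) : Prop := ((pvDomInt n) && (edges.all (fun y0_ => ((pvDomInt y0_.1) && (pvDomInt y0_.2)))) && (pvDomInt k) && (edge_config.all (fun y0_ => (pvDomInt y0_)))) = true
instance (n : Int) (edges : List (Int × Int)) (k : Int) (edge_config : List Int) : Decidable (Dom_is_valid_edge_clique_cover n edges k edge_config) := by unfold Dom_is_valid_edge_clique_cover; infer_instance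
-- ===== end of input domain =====

-- B replaces A's unordered-pair edge set and per-group double index loop by per-vertex
-- adjacency sets built in one zip pass, checking S - {u} ⊆ adj[u] per group vertex u (idiomatic, same cost).

-- ===== PORT A =====
def pvEdgeSetA (edges : List (Int × Int)) : PySem.Set (Int × Int) :=
  edges.foldl (fun s p => PySem.Set.add s (min p.1 p.2, max p.1 p.2)) PySem.Set.empty

def pvVerticesA (edges : List (Int × Int)) (edge_config : List Int) (group : Int) : PySem.Set Int :=
  (PySem.List.enumerate edge_config 0).foldl
    (fun vs p =>
      if p.2 = group then
        match PySem.List.pyGet? edges p.1 with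
        | some e => PySem.Set.add (PySem.Set.add vs e.1) e.2
        | none => vs          -- unreachable: idx < len(edge_config) = len(edges) here
      else vs)
    PySem.Set.empty

def pvVertsA (edges : List (Int × Int)) (edge_config : List Int) (group : Int) : List Int :=
  PySem.List.sorted (pvVerticesA edges edge_config group) (fun x => x) false

-- a, b = min(verts[i], verts[j]), max(verts[i], verts[j]); (a, b) in edge_set
def pvPairOkA (edge_set : PySem.Set (Int × Int)) (u w : Int) : Bool :=
  PySem.Set.contains edge_set (min u w, max u w)

def pvGroupOkA (edges : List (Int × Int)) (edge_config : List Int)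
    (edge_set : PySem.Set (Int × Int)) (group : Int) : Bool :=
  (PySem.List.pyRange 0 ((pvVertsA edges edge_config group).length : Int) 1).all (fun i =>
    (PySem.List.pyRange (i + 1) ((pvVertsA edges edge_config group).length : Int) 1).all (fun j =>
      pvPairOkA edge_set (PySem.List.pyGetD (pvVertsA edges edge_config group) i 0)
        (PySem.List.pyGetD (pvVertsA edges edge_config group) j 0)))

def is_valid_edge_clique_cover (n : Int) (edges : List (Int × Int)) (k : Int) (edge_config : List Int) : Bool :=
  if edge_config.length ≠ edges.length then false
  else if edges.length = 0 then true
  else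
    match PySem.List.max? edge_config (fun g => g) with
    | none => false           -- unreachable: edge_config is nonempty here
    | some max_group =>
      if max_group ≥ k then false
      else if edge_config.any (fun g => decide (g < 0)) then false
      else
        (PySem.List.pyRange 0 (max_group + 1) 1).all
          (pvGroupOkA edges edge_config (pvEdgeSetA edges))

-- ===== PORT B =====
def pvAdjStepB (adj : PySem.Dict Int (PySem.Set Int)) (p : Int × (Int × Int)) :
    PySem.Dict Int (PySem.Set Int) :=
  PySem.Dict.modify (PySem.Dict.modify adj p.2.1 [] (fun s => PySem.Set.add s p.2.2))
    p.2.2 [] (fun s => PySem.Set.add s p.2.1)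

def pvGrpStepB (groups : PySem.Dict Int (PySem.Set Int)) (p : Int × (Int × Int)) :
    PySem.Dict Int (PySem.Set Int) :=
  PySem.Dict.modify groups p.1 [] (fun s => PySem.Set.update s [p.2.1, p.2.2])

def pvCliqueOkB (adj : PySem.Dict Int (PySem.Set Int)) (S : PySem.Set Int) : Bool :=
  S.all (fun u => PySem.Set.issubset (PySem.Set.diff S [u]) (PySem.Dict.getD adj u []))

def is_valid_edge_clique_cover_alt (n : Int) (edges : List (Int × Int)) (k : Int) (edge_config : List Int) : Bool :=
  if edge_config.length ≠ edges.length then false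
  else if edges.length = 0 then true
  else
    match PySem.List.max? edge_config (fun g => g) with
    | none => false           -- unreachable: edge_config is nonempty here
    | some max_group =>
      if max_group ≥ k then false
      else if edge_config.any (fun g => decide (g < 0)) then false
      else
        let st := (edge_config.zip edges).foldl
          (fun st p => (pvAdjStepB st.1 p, pvGrpStepB st.2 p))
          (PySem.Dict.empty, PySem.Dict.empty)
        st.2.values.all (pvCliqueOkB st.1)

-- ===== PRECONDITION & SPEC =====
def Spec_is_valid_edge_clique_cover (n : Int) (edges : List (Int × Int)) (k : Int) (edge_config : List Int) (out : Bool) : Prop := out = is_valid_edge_clique_cover_alt n edges k edge_config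
instance (n : Int) (edges : List (Int × Int)) (k : Int) (edge_config : List Int) (out : Bool) : Decidable (Spec_is_valid_edge_clique_cover n edges k edge_config out) := by unfold Spec_is_valid_edge_clique_cover; infer_instance

-- ===== CLAIM (what is proved, stated in full; the proofs are below) =====
def Claim_equal_is_valid_edge_clique_cover : Prop := ∀ (n : Int) (edges : List (Int × Int)) (k : Int) (edge_config : List Int), Dom_is_valid_edge_clique_cover n edges k edge_config → Spec_is_valid_edge_clique_cover n edges k edge_config (is_valid_edge_clique_cover n edges k edge_config)

-- ===== LEMMAS AND PROOFS =====

-- a (group, (u, v)) entry of zip(edge_config, edges) touches vertex y in group g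
def pvTouched (edges : List (Int × Int)) (cfg : List Int) (g y : Int) : Prop :=
  ∃ p ∈ cfg.zip edges, p.1 = g ∧ (y = p.2.1 ∨ y = p.2.2)

def pvHasEdge (edges : List (Int × Int)) (u w : Int) : Prop :=
  ∃ p ∈ edges, (p.1 = u ∧ p.2 = w) ∨ (p.1 = w ∧ p.2 = u)

def pvClique (edges : List (Int × Int)) (cfg : List Int) (g : Int) : Prop :=
  ∀ u w, pvTouched edges cfg g u → pvTouched edges cfg g w → u < w → pvHasEdge edges u w

lemma mem_pvEdgeSetA (edges : List (Int × Int)) (x : Int × Int) :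
    x ∈ pvEdgeSetA edges ↔ ∃ p ∈ edges, x = (min p.1 p.2, max p.1 p.2) := by
  unfold pvEdgeSetA
  rw [PySem.Set.mem_foldl_add]
  simp [PySem.Set.empty]

lemma pair_minmax_eq (a b u w : Int) (huw : u < w) :
    (min a b, max a b) = (u, w) ↔ (a = u ∧ b = w) ∨ (a = w ∧ b = u) := by
  rw [Prod.mk.injEq]
  rcases le_total a b with h | h
  · rw [min_eq_left h, max_eq_right h]
    constructor
    · intro hh; exact Or.inl hh
    · rintro (hh | ⟨h1, h2⟩)
      · exact hh
      · constructor <;> omega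
  · rw [min_eq_right h, max_eq_left h]
    constructor
    · intro hh; exact Or.inr ⟨hh.2, hh.1⟩
    · rintro (⟨h1, h2⟩ | hh)
      · constructor <;> omega
      · exact ⟨hh.2, hh.1⟩

lemma mem_vertfold (edges : List (Int × Int)) (g : Int) (l : List (Int × Int))
    (init : PySem.Set Int) (y : Int) :
    y ∈ l.foldl
      (fun vs p =>
        if p.2 = g then
          match PySem.List.pyGet? edges p.1 with
          | some e => PySem.Set.add (PySem.Set.add vs e.1) e.2
          | none => vs
        else vs) init
    ↔ y ∈ init ∨ ∃ p ∈ l, p.2 = g ∧ ∃ e, PySem.List.pyGet? edges p.1 = some e ∧ (y = e.1 ∨ y = e.2) := by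
  induction l generalizing init with
  | nil => simp
  | cons x xs ih =>
    rw [List.foldl_cons, ih]
    by_cases hx : x.2 = g
    · simp only [hx, if_true]
      cases he : PySem.List.pyGet? edges x.1 with
      | none => simp [he, hx]
      | some e =>
        simp only [List.mem_cons, PySem.Set.mem_add]
        constructor
        · rintro (((h | h) | h) | ⟨p, hp, hrest⟩)
          · exact Or.inl h
          · exact Or.inr ⟨x, Or.inl rfl, hx, e, he, Or.inl h⟩
          · exact Or.inr ⟨x, Or.inl rfl, hx, e, he, Or.inr h⟩
          · exact Or.inr ⟨p, Or.inr hp, hrest⟩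
        · rintro (h | ⟨p, (rfl | hp), hpg, e', he', hy⟩)
          · exact Or.inl (Or.inl (Or.inl h))
          · rw [he] at he'; cases he'
            rcases hy with h | h
            · exact Or.inl (Or.inl (Or.inr h))
            · exact Or.inl (Or.inr h)
          · exact Or.inr ⟨p, hp, hpg, e', he', hy⟩
    · simp only [hx, if_false, List.mem_cons]
      constructor
      · rintro (h | ⟨p, hp, hrest⟩)
        · exact Or.inl h
        · exact Or.inr ⟨p, Or.inr hp, hrest⟩
      · rintro (h | ⟨p, (rfl | hp), hpg, hrest⟩)
        · exact Or.inl h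
        · exact absurd hpg hx
        · exact Or.inr ⟨p, hp, hpg, hrest⟩

lemma mem_pvVerticesA (edges : List (Int × Int)) (cfg : List Int)
    (hlen : cfg.length = edges.length) (g y : Int) :
    y ∈ pvVerticesA edges cfg g ↔ pvTouched edges cfg g y := by
  unfold pvVerticesA pvTouched
  rw [mem_vertfold]
  simp only [PySem.Set.empty, List.not_mem_nil, false_or]
  constructor
  · rintro ⟨p, hp, hpg, e, he, hy⟩
    obtain ⟨j, hj, rfl⟩ := (PySem.List.mem_enumerate_iff _ _ _).mp hp
    simp only at hpg hy he
    rw [show ((0 : Int) + (j : Int)) = ((j : Int)) by ring] at he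
    rw [PySem.List.pyGet?_natCast] at he
    have hj2 : j < edges.length := by
      by_contra hc
      rw [List.getElem?_eq_none (by omega)] at he
      simp at he
    rw [List.getElem?_eq_getElem hj2] at he
    cases he
    refine ⟨(cfg[j], edges[j]), ?_, by simpa using hpg, by simpa using hy⟩
    rw [List.mem_iff_getElem]
    exact ⟨j, by simp [List.length_zip]; omega, by simp [List.getElem_zip]⟩
  · rintro ⟨p, hp, hpg, hy⟩
    obtain ⟨j, hj, hpj⟩ := List.mem_iff_getElem.mp hp
    rw [List.length_zip] at hj
    have hj1 : j < cfg.length := by omega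
    have hj2 : j < edges.length := by omega
    rw [List.getElem_zip] at hpj
    refine ⟨(j, cfg[j]), (PySem.List.mem_enumerate_iff _ _ _).mpr ⟨j, hj1, by simp⟩, ?_, edges[j], ?_, ?_⟩
    · subst hpj; simpa using hpg
    · rw [PySem.List.pyGet?_natCast, List.getElem?_eq_getElem hj2]
    · subst hpj; simpa using hy

lemma nodup_vertfold (edges : List (Int × Int)) (g : Int) (l : List (Int × Int))
    (init : PySem.Set Int) (h : init.Nodup) :
    (l.foldl
      (fun vs p =>
        if p.2 = g then
          match PySem.List.pyGet? edges p.1 with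
          | some e => PySem.Set.add (PySem.Set.add vs e.1) e.2
          | none => vs
        else vs) init).Nodup := by
  induction l generalizing init with
  | nil => exact h
  | cons x xs ih =>
    rw [List.foldl_cons]
    apply ih
    split
    · cases PySem.List.pyGet? edges x.1 with
      | none => exact h
      | some e => exact PySem.Set.nodup_add _ _ (PySem.Set.nodup_add _ _ h)
    · exact h

lemma nodup_pvVerticesA (edges : List (Int × Int)) (cfg : List Int) (g : Int) :
    (pvVerticesA edges cfg g).Nodup := by
  unfold pvVerticesA
  exact nodup_vertfold edges g _ _ List.nodup_nil

lemma all_pairs_iff (verts : List Int) (f : Int → Int → Bool) (hp : verts.Pairwise (· < ·)) :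
    ((PySem.List.pyRange 0 (verts.length : Int) 1).all (fun i =>
      (PySem.List.pyRange (i + 1) (verts.length : Int) 1).all (fun j =>
        f (PySem.List.pyGetD verts i 0) (PySem.List.pyGetD verts j 0))) = true)
    ↔ ∀ u ∈ verts, ∀ w ∈ verts, u < w → f u w = true := by
  have hpg := List.pairwise_iff_getElem.mp hp
  rw [List.all_eq_true]
  constructor
  · intro h u hu w hw huw
    obtain ⟨a, ha, hua⟩ := List.mem_iff_getElem.mp hu
    obtain ⟨b, hb, hwb⟩ := List.mem_iff_getElem.mp hw
    have hab : a < b := by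
      rcases lt_trichotomy a b with h' | h' | h'
      · exact h'
      · exfalso; subst h'; rw [hua] at hwb; omega
      · exfalso; have := hpg b a hb ha h'; omega
    have h1 := h (a : Int) (by rw [PySem.List.mem_pyRange_one]; constructor <;> [positivity; exact_mod_cast Nat.cast_lt.mpr ha])
    rw [List.all_eq_true] at h1
    have h2 := h1 (b : Int) (by rw [PySem.List.mem_pyRange_one]; constructor <;> [exact_mod_cast hab; exact_mod_cast Nat.cast_lt.mpr hb])
    rw [PySem.List.pyGetD_natCast, PySem.List.pyGetD_natCast,
        List.getD_eq_getElem _ _ ha, List.getD_eq_getElem _ _ hb, hua, hwb] at h2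
    exact h2
  · intro h i hi
    rw [PySem.List.mem_pyRange_one] at hi
    rw [List.all_eq_true]
    intro j hj
    rw [PySem.List.mem_pyRange_one] at hj
    have hiN : i.toNat < verts.length := by omega
    have hjN : j.toNat < verts.length := by omega
    rw [show i = ((i.toNat : Nat) : Int) from (Int.toNat_of_nonneg hi.1).symm,
        show j = ((j.toNat : Nat) : Int) from (Int.toNat_of_nonneg (by omega)).symm,
        PySem.List.pyGetD_natCast, PySem.List.pyGetD_natCast,
        List.getD_eq_getElem _ _ hiN, List.getD_eq_getElem _ _ hjN]
    exact h _ (List.getElem_mem _) _ (List.getElem_mem _) (hpg _ _ hiN hjN (by omega))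

lemma pvHasEdge_symm (edges : List (Int × Int)) (u w : Int) :
    pvHasEdge edges u w ↔ pvHasEdge edges w u := by
  unfold pvHasEdge
  constructor <;> (rintro ⟨p, hp, h⟩; exact ⟨p, hp, h.symm⟩)

lemma pvGroupOkA_iff (edges : List (Int × Int)) (cfg : List Int)
    (hlen : cfg.length = edges.length) (g : Int) :
    pvGroupOkA edges cfg (pvEdgeSetA edges) g = true ↔ pvClique edges cfg g := by
  have hnd : (pvVertsA edges cfg g).Nodup :=
    ((PySem.List.sorted_perm (pvVerticesA edges cfg g) (fun x : Int => x) false).nodup_iff).mpr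
      (nodup_pvVerticesA edges cfg g)
  have hle : (pvVertsA edges cfg g).Pairwise (fun a b : Int => a ≤ b) := by
    have := PySem.List.sorted_pairwise (pvVerticesA edges cfg g) (fun x : Int => x)
    simpa [pvVertsA] using this
  have hlt : (pvVertsA edges cfg g).Pairwise (· < ·) :=
    (hle.and hnd).imp (fun h => lt_of_le_of_ne h.1 h.2)
  have hmem : ∀ y : Int, y ∈ pvVertsA edges cfg g ↔ pvTouched edges cfg g y := by
    intro y
    unfold pvVertsA
    rw [PySem.List.mem_sorted, mem_pvVerticesA edges cfg hlen]
  have hcheck : ∀ u w : Int, u < w →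
      ((pvPairOkA (pvEdgeSetA edges) u w = true) ↔ pvHasEdge edges u w) := by
    intro u w huw
    unfold pvPairOkA
    rw [PySem.Set.contains_iff, min_eq_left huw.le, max_eq_right huw.le, mem_pvEdgeSetA]
    unfold pvHasEdge
    constructor
    · rintro ⟨p, hp, he⟩
      exact ⟨p, hp, (pair_minmax_eq p.1 p.2 u w huw).mp he.symm⟩
    · rintro ⟨p, hp, he⟩
      exact ⟨p, hp, ((pair_minmax_eq p.1 p.2 u w huw).mpr he).symm⟩
  unfold pvGroupOkA
  rw [all_pairs_iff (pvVertsA edges cfg g) (pvPairOkA (pvEdgeSetA edges)) hlt]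
  unfold pvClique
  constructor
  · intro h u w hu hw huw
    exact (hcheck u w huw).mp (h u ((hmem u).mpr hu) w ((hmem w).mpr hw) huw)
  · intro h u hu w hw huw
    exact (hcheck u w huw).mpr (h u w ((hmem u).mp hu) ((hmem w).mp hw) huw)

lemma foldl_prod_split {α β γ : Type} (l : List γ) (f : α → γ → α) (g : β → γ → β) (a : α) (b : β) :
    l.foldl (fun st p => (f st.1 p, g st.2 p)) (a, b) = (l.foldl f a, l.foldl g b) := by
  induction l generalizing a b with
  | nil => rfl
  | cons x xs ih => simpa using ih (f a x) (g b x)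

lemma mem_adj_foldl (l : List (Int × (Int × Int))) (d : PySem.Dict Int (PySem.Set Int)) (u w : Int) :
    w ∈ (l.foldl pvAdjStepB d).getD u [] ↔
      w ∈ d.getD u [] ∨ ∃ p ∈ l, (p.2.1 = u ∧ p.2.2 = w) ∨ (p.2.1 = w ∧ p.2.2 = u) := by
  induction l generalizing d with
  | nil => simp
  | cons x xs ih =>
    rw [List.foldl_cons, ih]
    have hstep : w ∈ (pvAdjStepB d x).getD u [] ↔
        w ∈ d.getD u [] ∨ (x.2.1 = u ∧ x.2.2 = w) ∨ (x.2.1 = w ∧ x.2.2 = u) := by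
      unfold pvAdjStepB
      simp only [PySem.Dict.getD_modify, PySem.Set.mem_add]
      split_ifs with h1 h2 h3 <;> simp_all <;> tauto
    rw [hstep]
    simp only [List.mem_cons]
    constructor
    · rintro ((h | h) | ⟨p, hp, h⟩)
      · exact Or.inl h
      · exact Or.inr ⟨x, Or.inl rfl, h⟩
      · exact Or.inr ⟨p, Or.inr hp, h⟩
    · rintro (h | ⟨p, (rfl | hp), h⟩)
      · exact Or.inl (Or.inl h)
      · exact Or.inl (Or.inr h)
      · exact Or.inr ⟨p, hp, h⟩

lemma mem_grp_foldl (l : List (Int × (Int × Int))) (d : PySem.Dict Int (PySem.Set Int)) (g y : Int) :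
    y ∈ (l.foldl pvGrpStepB d).getD g [] ↔
      y ∈ d.getD g [] ∨ ∃ p ∈ l, p.1 = g ∧ (y = p.2.1 ∨ y = p.2.2) := by
  induction l generalizing d with
  | nil => simp
  | cons x xs ih =>
    rw [List.foldl_cons, ih]
    have hstep : y ∈ (pvGrpStepB d x).getD g [] ↔
        y ∈ d.getD g [] ∨ (x.1 = g ∧ (y = x.2.1 ∨ y = x.2.2)) := by
      unfold pvGrpStepB
      simp only [PySem.Dict.getD_modify, PySem.Set.mem_update]
      split_ifs with h1 <;> simp_all <;> tauto
    rw [hstep]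
    simp only [List.mem_cons]
    constructor
    · rintro ((h | h) | ⟨p, hp, h⟩)
      · exact Or.inl h
      · exact Or.inr ⟨x, Or.inl rfl, h⟩
      · exact Or.inr ⟨p, Or.inr hp, h⟩
    · rintro (h | ⟨p, (rfl | hp), h⟩)
      · exact Or.inl (Or.inl h)
      · exact Or.inl (Or.inr h)
      · exact Or.inr ⟨p, hp, h⟩

lemma pvCliqueOkB_iff (adj : PySem.Dict Int (PySem.Set Int)) (S : PySem.Set Int) :
    pvCliqueOkB adj S = true ↔ ∀ u ∈ S, ∀ w ∈ S, w ≠ u → w ∈ adj.getD u [] := by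
  unfold pvCliqueOkB
  rw [List.all_eq_true]
  constructor
  · intro h u hu w hw hne
    have := h u hu
    rw [PySem.Set.issubset_iff] at this
    exact this w ((PySem.Set.mem_diff _ _ _).mpr ⟨hw, by simpa using hne⟩)
  · intro h u hu
    rw [PySem.Set.issubset_iff]
    intro x hx
    rw [PySem.Set.mem_diff] at hx
    exact h u hu x hx.1 (by simpa using hx.2)

lemma keys_grp_foldl (l : List (Int × (Int × Int))) (d : PySem.Dict Int (PySem.Set Int)) :
    (l.foldl pvGrpStepB d).keys = PySem.Set.update d.keys (l.map (·.1)) := by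
  induction l generalizing d with
  | nil => simp [PySem.Set.update]
  | cons x xs ih =>
    rw [List.foldl_cons, ih, List.map_cons, PySem.Set.update_cons]
    congr 1
    unfold pvGrpStepB
    rw [PySem.Dict.keys_modify]
    by_cases hc : d.contains x.1
    · rw [PySem.Dict.keys_insert_of_contains d _ hc,
          PySem.Set.add_of_mem ((PySem.Dict.contains_iff_mem_keys d x.1).mp hc)]
    · rw [PySem.Dict.keys_insert_of_not_contains d _ (by simpa using hc),
          PySem.Set.add_of_not_mem
            (fun hm => by simp [(PySem.Dict.contains_iff_mem_keys d x.1).mpr hm] at hc)]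

lemma core_eq (edges : List (Int × Int)) (cfg : List Int)
    (hlen : cfg.length = edges.length) (M : Int)
    (hM : PySem.List.max? cfg (fun g => g) = some M)
    (hneg : cfg.any (fun g => decide (g < 0)) = false) :
    ((PySem.List.pyRange 0 (M + 1) 1).all (pvGroupOkA edges cfg (pvEdgeSetA edges)))
      = ((cfg.zip edges).foldl (fun st p => (pvAdjStepB st.1 p, pvGrpStepB st.2 p))
          (PySem.Dict.empty, PySem.Dict.empty)).2.values.all
          (pvCliqueOkB ((cfg.zip edges).foldl (fun st p => (pvAdjStepB st.1 p, pvGrpStepB st.2 p))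
            (PySem.Dict.empty, PySem.Dict.empty)).1) := by
  rw [foldl_prod_split]
  set l := cfg.zip edges with hl
  set adj := l.foldl pvAdjStepB PySem.Dict.empty with hadj
  set grp := l.foldl pvGrpStepB PySem.Dict.empty with hgrp
  have hmapfst : l.map Prod.fst = cfg := List.map_fst_zip hlen.le
  have hmapsnd : l.map Prod.snd = edges := List.map_snd_zip hlen.ge
  have hkeys : grp.keys = PySem.Set.ofList cfg := by
    rw [hgrp, keys_grp_foldl]
    simp only [PySem.Dict.keys_empty, PySem.Set.update_nil_left]
    rw [show (l.map (·.1)) = cfg from hmapfst]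
  have hknd : grp.keys.Nodup := by rw [hkeys]; exact PySem.Set.nodup_ofList cfg
  have hvals : grp.values = grp.keys.map (fun g => grp.getD g []) :=
    PySem.Dict.values_eq_map_keys grp hknd []
  -- adjacency lookup = pvHasEdge
  have hadjmem : ∀ u w : Int, w ∈ adj.getD u [] ↔ pvHasEdge edges u w := by
    intro u w
    rw [hadj, mem_adj_foldl]
    simp only [PySem.Dict.getD_empty, List.not_mem_nil, false_or]
    unfold pvHasEdge
    rw [← hmapsnd]
    constructor
    · rintro ⟨p, hp, h⟩
      exact ⟨p.2, List.mem_map_of_mem hp, h⟩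
    · rintro ⟨e, he, h⟩
      obtain ⟨p, hp, rfl⟩ := List.mem_map.mp he
      exact ⟨p, hp, h⟩
  -- bucket membership = pvTouched
  have hgrpmem : ∀ g y : Int, y ∈ grp.getD g [] ↔ pvTouched edges cfg g y := by
    intro g y
    rw [hgrp, mem_grp_foldl]
    simp only [PySem.Dict.getD_empty, List.not_mem_nil, false_or]
    rfl
  -- bound facts
  have hub : ∀ g ∈ cfg, g ≤ M := by
    intro g hg
    have := PySem.List.max?_isMax hM g hg
    simpa using this
  have hlb : ∀ g ∈ cfg, 0 ≤ g := by
    intro g hg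
    rw [List.any_eq_false] at hneg
    have := hneg g hg
    simp at this
    omega
  -- turn both sides into propositions
  rw [show ∀ a b : Bool, (a = b) = ((a = true) ↔ (b = true)) from by decide]
  rw [List.all_eq_true, hvals, List.all_eq_true]
  constructor
  · intro h S hS
    obtain ⟨g, hgk, rfl⟩ := List.mem_map.mp hS
    rw [hkeys, PySem.Set.mem_ofList] at hgk
    have hclique : pvClique edges cfg g := by
      have := h g (by rw [PySem.List.mem_pyRange_one]; exact ⟨hlb g hgk, by have := hub g hgk; omega⟩)
      exact (pvGroupOkA_iff edges cfg hlen g).mp this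
    rw [pvCliqueOkB_iff]
    intro u hu w hw hne
    rw [hgrpmem] at hu hw
    rw [hadjmem]
    rcases lt_or_gt_of_ne (Ne.symm hne) with hlt | hgt
    · exact hclique u w hu hw hlt
    · rw [pvHasEdge_symm]
      exact hclique w u hw hu hgt
  · intro h g hg
    rw [PySem.List.mem_pyRange_one] at hg
    rw [pvGroupOkA_iff edges cfg hlen g]
    by_cases hgc : g ∈ cfg
    · have hS : grp.getD g [] ∈ grp.keys.map (fun g => grp.getD g []) :=
        List.mem_map_of_mem (by rw [hkeys, PySem.Set.mem_ofList]; exact hgc)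
      have := (pvCliqueOkB_iff adj (grp.getD g [])).mp (h _ hS)
      intro u w hu hw huw
      rw [← hgrpmem] at hu hw
      have := this u hu w hw (by omega)
      rwa [hadjmem] at this
    · intro u w hu hw huw
      exfalso
      obtain ⟨p, hp, hpg, _⟩ := hu
      apply hgc
      rw [← hmapfst]
      rw [← hpg]
      exact List.mem_map_of_mem hp

-- ===== VERDICT (by name: the statement is the Claim_ definition above) =====
theorem is_valid_edge_clique_cover_spec : Claim_equal_is_valid_edge_clique_cover := by
  intro n edges k cfg _
  unfold Spec_is_valid_edge_clique_cover
  unfold is_valid_edge_clique_cover is_valid_edge_clique_cover_alt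
  by_cases h1 : cfg.length ≠ edges.length
  · simp [h1]
  · push_neg at h1
    by_cases h2 : edges.length = 0
    · simp [h1, h2]
    · cases hM : PySem.List.max? cfg (fun g => g) with
      | none => simp [h1, h2, hM]
      | some M =>
        by_cases h3 : M ≥ k
        · simp [h1, h2, hM, h3]
        · by_cases h4 : cfg.any (fun g => decide (g < 0))
          · simp [h1, h2, hM, h3, h4]
          · simp only [h1, h2, hM, h3, h4, if_neg, if_pos, ne_eq, not_true_eq_false,
              Bool.false_eq_true, if_false, ite_false, ite_true, not_false_eq_true]
            rw [core_eq edges cfg h1 M hM (by simpa using h4)]
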